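-- pv_equiv track=rewrite | github.com/huggingface/accelerate | src/accelerate/utils/modeling.py | get_module_leaves
-- ===== SOURCE A (Python) =====
-- def get_module_leaves(module_sizes):
--     module_children = {}
--     for module in module_sizes:
--         if module == "" or "." not in module:
--             continue
--         parent = module.rsplit(".", 1)[0]
--         module_children[parent] = module_children.get(parent, 0) + 1
--     leaves = [module for module in module_sizes if module_children.get(module, 0) == 0 and module != ""]
--     return leaves
-- ===== SOURCE B (Python) =====
-- def get_module_leaves(module_sizes):
--     def has_child(m):
--         p = m + "."
--         return any(o.startswith(p) and "." not in o[len(p):] for o in module_sizes)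
--     return [m for m in module_sizes if m != "" and not has_child(m)]
-- ===== Notes on version B (the rewrite author's own statement) =====
-- stated objective: alternative
-- what changed: B discards A's parent-count dictionary and rsplit parent extraction entirely: it keeps m iff no module in the dict starts with m+'.' with a dot-free remainder, testing leaf-ness by a direct prefix scan instead of building and querying a child counter.
import Mathlib
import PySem

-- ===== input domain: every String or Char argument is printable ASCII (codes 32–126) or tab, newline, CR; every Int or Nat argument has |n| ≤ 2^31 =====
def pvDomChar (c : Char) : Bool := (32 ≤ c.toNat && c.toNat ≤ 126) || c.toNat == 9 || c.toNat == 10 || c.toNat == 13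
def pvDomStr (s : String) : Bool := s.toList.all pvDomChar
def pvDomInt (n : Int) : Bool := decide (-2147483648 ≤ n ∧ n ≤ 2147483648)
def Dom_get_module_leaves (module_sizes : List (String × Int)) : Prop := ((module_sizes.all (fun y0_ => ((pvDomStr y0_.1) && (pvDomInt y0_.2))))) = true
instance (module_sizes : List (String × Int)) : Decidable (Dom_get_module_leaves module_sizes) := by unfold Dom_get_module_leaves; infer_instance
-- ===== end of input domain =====

-- B drops A's parent-count dictionary and rsplit: it tests leaf-ness directly by a prefix
-- scan (no module starts with m+'.' with a dot-free remainder) — alternative, not faster.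

-- ===== PORT A =====
-- m.rsplit(".", 1)[0] — everything before the LAST '.', or the whole string if no '.'.
def pvParent (m : String) : String :=
  String.ofList (((m.toList.reverse.dropWhile (fun c => c ≠ '.')).drop 1).reverse)

-- Python iterates over the KEYS of the dict module_sizes; under the assoc-list
-- convention those are the first occurrences of the keys, i.e. PySem.List.dedup.
def get_module_leaves (module_sizes : List (String × Int)) : List String :=
  let keys := PySem.List.dedup (module_sizes.map (·.1))
  let module_children : PySem.Dict String Int :=
    keys.foldl (fun d m =>
      if m = "" ∨ PySem.Str.isIn "." m = false then d
      else PySem.Dict.insert d (pvParent m) (PySem.Dict.getD d (pvParent m) 0 + 1))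
      PySem.Dict.empty
  keys.filter (fun m => PySem.Dict.getD module_children m 0 == 0 && m != "")

-- ===== PORT B =====
-- has_child(m): some module starts with m+"." and has no further dot after that prefix.
def pvHasChild (keys : List String) (m : String) : Bool :=
  keys.any (fun o =>
    PySem.Str.startswith o (m ++ ".") &&
    !(PySem.Str.isIn "." (PySem.Str.slice o (some (PySem.Str.len (m ++ "."))) none)))

def get_module_leaves_alt (module_sizes : List (String × Int)) : List String :=
  let keys := PySem.List.dedup (module_sizes.map (·.1))
  keys.filter (fun m => m != "" && !(pvHasChild keys m))

-- ===== PRECONDITION & SPEC =====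
def Spec_get_module_leaves (module_sizes : List (String × Int)) (out : List String) : Prop := out = get_module_leaves_alt module_sizes
instance (module_sizes : List (String × Int)) (out : List String) : Decidable (Spec_get_module_leaves module_sizes out) := by unfold Spec_get_module_leaves; infer_instance

-- ===== CLAIM (what is proved, stated in full; the proofs are below) =====
def Claim_equal_get_module_leaves : Prop := ∀ (module_sizes : List (String × Int)), Dom_get_module_leaves module_sizes → Spec_get_module_leaves module_sizes (get_module_leaves module_sizes)

-- ===== LEMMAS AND PROOFS =====

-- the Boolean "this key contributes a child" test of A's counting loop
def pvChild (o : String) : Bool := o != "" && PySem.Str.isIn "." o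

theorem pv_guard_false {m : String} (h : m = "" ∨ PySem.Str.isIn "." m = false) :
    pvChild m = false := by
  unfold pvChild
  rcases h with h | h
  · rw [h, bne_self_eq_false, Bool.false_and]
  · rw [h, Bool.and_false]

theorem pv_guard_true {m : String} (h : ¬ (m = "" ∨ PySem.Str.isIn "." m = false)) :
    pvChild m = true := by
  rw [not_or] at h
  unfold pvChild
  rw [Bool.and_eq_true]
  exact ⟨bne_iff_ne.mpr h.1, Bool.ne_false_iff.mp h.2⟩

-- A's guarded fold is the plain counter fold over the parents of the contributing keys
theorem pv_fold_eq_counter_fold (keys : List String) (d : PySem.Dict String Int) :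
    keys.foldl (fun (d : PySem.Dict String Int) m =>
      if m = "" ∨ PySem.Str.isIn "." m = false then d
      else PySem.Dict.insert d (pvParent m) (PySem.Dict.getD d (pvParent m) 0 + 1)) d
    = ((keys.filter pvChild).map pvParent).foldl
        (fun d x => PySem.Dict.insert d x (PySem.Dict.getD d x 0 + 1)) d := by
  induction keys generalizing d with
  | nil => rfl
  | cons m keys ih =>
      rw [List.foldl_cons, List.filter_cons]
      by_cases h : m = "" ∨ PySem.Str.isIn "." m = false
      · rw [if_pos h, pv_guard_false h]
        simp only [Bool.false_eq_true, if_false]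
        exact ih d
      · rw [if_neg h, pv_guard_true h, if_pos rfl, List.map_cons, List.foldl_cons]
        exact ih _

theorem pv_drop_helper (l t : List Char) (c : Char) :
    (l ++ c :: t).drop (l.length + 1) = t := by
  induction l with
  | nil => rfl
  | cons a l ih => simp [ih]

-- characterisation of "'.' ∈ l and everything before the last '.' is m":
-- exactly "m ++ ['.'] is a prefix of l and no '.' occurs after that prefix"
theorem pv_last_dot_iff (l m : List Char) :
    (l ≠ [] ∧ '.' ∈ l ∧ ((l.reverse.dropWhile (fun c => c ≠ '.')).drop 1).reverse = m)
    ↔ ((m ++ ['.']) <+: l ∧ '.' ∉ l.drop (m.length + 1)) := by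
  constructor
  · rintro ⟨-, hdot, hm⟩
    have hmemr : '.' ∈ l.reverse := List.mem_reverse.mpr hdot
    cases hcr : l.reverse.dropWhile (fun c => decide (c ≠ '.')) with
    | nil =>
        have h := List.dropWhile_eq_nil_iff.mp hcr '.' hmemr
        simp at h
    | cons c r =>
        have hc : c = '.' := by
          have h := List.head?_dropWhile_not (fun c => decide (c ≠ '.')) l.reverse
          rw [hcr] at h
          simpa using h
        subst hc
        have hsplit : l.reverse.takeWhile (fun c => decide (c ≠ '.')) ++ '.' :: r = l.reverse := by
          rw [← hcr]; exact List.takeWhile_append_dropWhile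
        have hl : l = r.reverse ++ '.' :: (l.reverse.takeWhile (fun c => decide (c ≠ '.'))).reverse := by
          have h2 := congrArg List.reverse hsplit
          simpa using h2.symm
        have hmr : m = r.reverse := by
          rw [← hm, hcr]; simp
        have hnodot : '.' ∉ (l.reverse.takeWhile (fun c => decide (c ≠ '.'))).reverse := by
          intro hmem
          have h3 := List.mem_takeWhile_imp (List.mem_reverse.mp hmem)
          simp at h3
        refine ⟨⟨(l.reverse.takeWhile (fun c => decide (c ≠ '.'))).reverse, ?_⟩, ?_⟩
        · rw [hmr]
          conv_rhs => rw [hl]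
          simp
        · rw [hl, hmr, pv_drop_helper]
          exact hnodot
  · rintro ⟨⟨t, ht⟩, hnd⟩
    have hl : l = m ++ '.' :: t := by rw [← ht]; simp
    have htt : l.drop (m.length + 1) = t := by rw [hl, pv_drop_helper]
    rw [htt] at hnd
    refine ⟨by simp [hl], by simp [hl], ?_⟩
    have hrev : l.reverse = t.reverse ++ '.' :: m.reverse := by
      rw [hl]; simp
    have hdw : l.reverse.dropWhile (fun c => decide (c ≠ '.')) = '.' :: m.reverse := by
      rw [hrev, List.dropWhile_append]
      have h1 : t.reverse.dropWhile (fun c => decide (c ≠ '.')) = [] := by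
        rw [List.dropWhile_eq_nil_iff]
        intro x hx
        simp only [decide_eq_true_eq]
        intro hx'
        exact hnd (by rw [← hx']; exact List.mem_reverse.mp hx)
      rw [h1]
      simp
    rw [hdw]
    simp

-- singleton infix is membership
theorem pv_singleton_infix (l : List Char) : ['.'] <:+: l ↔ '.' ∈ l := by
  constructor
  · intro h; exact h.sublist.subset (List.mem_singleton_self _)
  · intro h
    obtain ⟨s, t, hst⟩ := List.append_of_mem h
    exact ⟨s, t, by rw [hst]; simp⟩

theorem pv_empty_iff (o : String) : o = "" ↔ o.toList = [] := by
  constructor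
  · intro h; rw [h]; rfl
  · intro h
    have h2 := congrArg String.ofList h
    rwa [String.ofList_toList] at h2
theorem pv_ofList_eq (x : List Char) (m : String) : String.ofList x = m ↔ x = m.toList := by
  constructor
  · intro h; rw [← h, String.toList_ofList]
  · intro h; rw [h, String.ofList_toList]

-- B's per-module child test coincides with "contributes a child whose parent is m"
theorem pv_childTest_eq (o m : String) :
    (PySem.Str.startswith o (m ++ ".") &&
      !(PySem.Str.isIn "." (PySem.Str.slice o (some (PySem.Str.len (m ++ "."))) none)))
    = (pvChild o && (pvParent o == m)) := by
  rw [Bool.eq_iff_iff]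
  simp only [Bool.and_eq_true, Bool.not_eq_true', beq_iff_eq]
  have hsw : PySem.Str.startswith o (m ++ ".") = true ↔ (m.toList ++ ['.']) <+: o.toList := by
    simp only [PySem.Str.startswith_eq, PySem.Chars.startswith_iff, String.toList_append]
    rfl
  have hslice : (PySem.Str.slice o (some (PySem.Str.len (m ++ "."))) none).toList
      = o.toList.drop (m.toList.length + 1) := by
    simp only [PySem.Str.toList_slice, PySem.Chars.slice_eq_listSlice, PySem.Str.len_eq,
      String.toList_append]
    rw [show ((m.toList ++ ".".toList).length : Int) = ((m.toList.length + 1 : Nat) : Int) by simp]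
    rw [PySem.List.slice_from_natCast]
  have hin : PySem.Str.isIn "." (PySem.Str.slice o (some (PySem.Str.len (m ++ "."))) none) = false
      ↔ '.' ∉ o.toList.drop (m.toList.length + 1) := by
    rw [Bool.eq_false_iff, ne_eq, PySem.Str.isIn_iff_infix, hslice]
    exact not_congr (pv_singleton_infix _)
  have hchild : pvChild o = true ↔ o.toList ≠ [] ∧ '.' ∈ o.toList := by
    unfold pvChild
    rw [Bool.and_eq_true, bne_iff_ne, ne_eq, pv_empty_iff, PySem.Str.isIn_iff_infix]
    exact and_congr Iff.rfl (pv_singleton_infix _)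
  have hpar : pvParent o = m ↔ ((o.toList.reverse.dropWhile (fun c => c ≠ '.')).drop 1).reverse = m.toList := by
    unfold pvParent
    exact pv_ofList_eq _ _
  rw [hsw, hin, hchild, hpar]
  constructor
  · rintro ⟨h1, h2⟩
    obtain ⟨ha, hb, hc⟩ := (pv_last_dot_iff o.toList m.toList).mpr ⟨h1, h2⟩
    exact ⟨⟨ha, hb⟩, hc⟩
  · rintro ⟨⟨ha, hb⟩, hc⟩
    exact (pv_last_dot_iff o.toList m.toList).mp ⟨ha, hb, hc⟩

theorem pv_pred_eq (keys : List String) (m : String) :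
    (PySem.Dict.getD
        (keys.foldl (fun (d : PySem.Dict String Int) m =>
          if m = "" ∨ PySem.Str.isIn "." m = false then d
          else PySem.Dict.insert d (pvParent m) (PySem.Dict.getD d (pvParent m) 0 + 1))
          PySem.Dict.empty) m 0 == 0 && m != "")
    = (m != "" && !(pvHasChild keys m)) := by
  rw [pv_fold_eq_counter_fold, PySem.Dict.getD_foldl_insert_add_one,
    PySem.Dict.getD_empty, zero_add, Bool.and_comm]
  congr 1
  have h1 : pvHasChild keys m = keys.any (fun o => pvChild o && (pvParent o == m)) := by
    unfold pvHasChild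
    congr 1
    funext o
    exact pv_childTest_eq o m
  rw [h1, Bool.eq_iff_iff]
  simp only [beq_iff_eq, Nat.cast_eq_zero, Bool.not_eq_true', List.any_eq_false,
    Bool.and_eq_true, not_and, List.count_eq_zero, List.mem_map,
    List.mem_filter, not_exists]
  constructor
  · intro h o ho hc hp
    exact h o ⟨ho, hc⟩ hp
  · intro h o hmem hp
    exact h o hmem.1 hmem.2 hp

-- ===== VERDICT (by name: the statement is the Claim_ definition above) =====
theorem get_module_leaves_spec : Claim_equal_get_module_leaves := by
  intro ms _
  unfold Spec_get_module_leaves get_module_leaves get_module_leaves_alt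
  dsimp only
  exact List.filter_congr (fun m _ => pv_pred_eq _ m)
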